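-- pv_equiv track=rewrite | github.com/eapata8/Python | Devoir 5/D5Q2.py | prodListePos_rec
-- ===== SOURCE A (Python) =====
-- def prodListePos_rec(l,n):
--     '''(list,int)->float
--        Retourne le produits des nombres strictement positifs de la liste l de longeur n.
--     '''
--     if n==0:
--         p=1
--     else:
--         if l[n-1]>0:
--             p = l[n-1]*prodListePos_rec(l,n-1)
--         else:
--             p = prodListePos_rec(l,n-1)
--     return p
-- ===== SOURCE B (Python) =====
-- def prodListePos_rec(l, n):
--     p = 1
--     for i in range(n):
--         if l[i] > 0:
--             p = p * l[i]
--     return p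
-- ===== Notes on version B (the rewrite author's own statement) =====
-- stated objective: simpler
-- what changed: Replaces A's element-at-a-time linear recursion from index n-1 down to 0 with a single iterative forward pass over l[:n] maintaining a running product accumulator.
import Mathlib
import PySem

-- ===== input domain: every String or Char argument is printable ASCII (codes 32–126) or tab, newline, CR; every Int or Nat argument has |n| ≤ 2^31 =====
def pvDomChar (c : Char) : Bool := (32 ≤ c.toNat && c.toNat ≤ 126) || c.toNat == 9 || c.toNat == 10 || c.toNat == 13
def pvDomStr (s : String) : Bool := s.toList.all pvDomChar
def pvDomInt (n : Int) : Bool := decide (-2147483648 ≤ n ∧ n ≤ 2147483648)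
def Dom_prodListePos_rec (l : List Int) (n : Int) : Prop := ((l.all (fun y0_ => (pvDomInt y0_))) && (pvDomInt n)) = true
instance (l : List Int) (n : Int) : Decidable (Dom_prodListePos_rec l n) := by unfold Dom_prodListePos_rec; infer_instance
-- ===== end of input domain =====

-- B replaces A's linear recursion (index n-1 down to 0) with one forward iterative
-- pass over the slice l[:n] maintaining a running-product accumulator (objective: simpler).

-- ===== PORT A =====
-- Literal port of A's recursion. Python diverges (RecursionError) for n < 0 and raises
-- IndexError when l[n-1] is out of range; both are outside Pre_. The 'n ≤ 0' guard and
-- the 'none => 0' arm only make the recursion total there.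
def prodListePos_rec (l : List Int) (n : Int) : Int :=
  if n ≤ 0 then 1
  else
    match PySem.List.pyGet? l (n - 1) with
    | none => 0
    | some x =>
      if x > 0 then x * prodListePos_rec l (n - 1)
      else prodListePos_rec l (n - 1)
termination_by n.toNat
decreasing_by all_goals omega

-- ===== PORT B =====
-- 'for i in range(n): if l[i] > 0: p = p * l[i]'. Python raises IndexError when some
-- i < n is out of range (outside Pre_); the fold's 'none => p' arm only keeps the port total there.
def prodListePos_rec_alt (l : List Int) (n : Int) : Int :=
  (PySem.List.pyRange 0 n 1).foldl
    (fun p i =>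
      match PySem.List.pyGet? l i with
      | none => p
      | some x => if x > 0 then p * x else p) 1

-- ===== PRECONDITION & SPEC =====
-- Pre_ excludes exactly the inputs where A raises: n < 0 (RecursionError) and n > len(l) (IndexError).
def Pre_prodListePos_rec (l : List Int) (n : Int) : Prop := 0 ≤ n ∧ n ≤ l.length
instance (l : List Int) (n : Int) : Decidable (Pre_prodListePos_rec l n) := by
  unfold Pre_prodListePos_rec; infer_instance

def pvWitness_prodListePos_rec : List Int × Int := ([2, -3, 4], 3)

def Spec_prodListePos_rec (l : List Int) (n : Int) (out : Int) : Prop := out = prodListePos_rec_alt l n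
instance (l : List Int) (n : Int) (out : Int) : Decidable (Spec_prodListePos_rec l n out) := by unfold Spec_prodListePos_rec; infer_instance

-- ===== CLAIM (what is proved, stated in full; the proofs are below) =====
def Claim_equal_prodListePos_rec : Prop := ∀ (l : List Int) (n : Int), Dom_prodListePos_rec l n → Pre_prodListePos_rec l n → Spec_prodListePos_rec l n (prodListePos_rec l n)

-- ===== LEMMAS AND PROOFS =====

-- factor the accumulator out of B's fold
lemma foldl_stepIdx_acc (l : List Int) (xs : List Int) (p : Int) :
    xs.foldl (fun p i => match PySem.List.pyGet? l i with
      | none => p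
      | some x => if x > 0 then p * x else p) p
      = p * xs.foldl (fun p i => match PySem.List.pyGet? l i with
      | none => p
      | some x => if x > 0 then p * x else p) 1 := by
  induction xs generalizing p with
  | nil => simp
  | cons y ys ih =>
    simp only [List.foldl_cons]
    rw [ih, ih (match PySem.List.pyGet? l y with
      | none => 1
      | some x => if x > 0 then 1 * x else 1)]
    rcases PySem.List.pyGet? l y with _ | x
    · simp
    · simp only []
      split_ifs <;> ring

lemma key (l : List Int) (m : Nat) (hm : m ≤ l.length) :
    prodListePos_rec l (m : Int)
      = (PySem.List.pyRange 0 (m : Int) 1).foldl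
          (fun p i => match PySem.List.pyGet? l i with
            | none => p
            | some x => if x > 0 then p * x else p) 1 := by
  induction m with
  | zero => simp [prodListePos_rec, PySem.List.pyRange_one_eq_nil]
  | succ k ih =>
    have hk : k < l.length := by omega
    rw [prodListePos_rec]
    have hne : ¬ ((k : Int) + 1 ≤ 0) := by omega
    have hcast : ((k : Int) + 1) - 1 = (k : Int) := by ring
    have hget : PySem.List.pyGet? l (((k : Int) + 1) - 1) = some l[k] := by
      rw [hcast, PySem.List.pyGet?_natCast]
      simp [hk]
    push_cast
    rw [if_neg hne, hget, hcast, ih (by omega),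
        PySem.List.pyRange_one_succ_right (by omega : (0:Int) ≤ (k:Int)),
        List.foldl_append]
    simp only [List.foldl_cons, List.foldl_nil]
    have hgetk : PySem.List.pyGet? l (k : Int) = some l[k] := by
      rw [PySem.List.pyGet?_natCast]; simp [hk]
    rw [hgetk, foldl_stepIdx_acc]
    split_ifs with h <;> simp [h, mul_comm]

-- ===== VERDICT (by name: the statement is the Claim_ definition above) =====
theorem prodListePos_rec_spec : Claim_equal_prodListePos_rec := by
  intro l n _ hpre
  obtain ⟨h0, hlen⟩ := hpre
  unfold Spec_prodListePos_rec prodListePos_rec_alt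
  have hn : n = ((n.toNat : Nat) : Int) := by omega
  rw [hn, key l n.toNat (by omega)]
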